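-- pv_equiv track=rewrite | github.com/CoderPOOP/50-Days-of-Code | sol155.py | increment_to_top
-- ===== SOURCE A (Python) =====
-- def increment_to_top(lst):
--     sl = sorted(lst)
--     output = 0
--     index = 0
--     while index < (len(sl) - 1):
--          output += sl[-1] - sl[index]
--          index += 1
--     return output
-- ===== SOURCE B (Python) =====
-- def increment_to_top(lst):
--     if not lst:
--         return 0
--     m = max(lst)
--     return m * len(lst) - sum(lst)
-- ===== Notes on version B (the rewrite author's own statement) =====
-- stated objective: faster
-- what changed: Replaced A's sort-then-scan (sum of last - each prefix element over the sorted list) with a closed form: max(lst)*len(lst) - sum(lst), no sorting and no indexing.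
import Mathlib
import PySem

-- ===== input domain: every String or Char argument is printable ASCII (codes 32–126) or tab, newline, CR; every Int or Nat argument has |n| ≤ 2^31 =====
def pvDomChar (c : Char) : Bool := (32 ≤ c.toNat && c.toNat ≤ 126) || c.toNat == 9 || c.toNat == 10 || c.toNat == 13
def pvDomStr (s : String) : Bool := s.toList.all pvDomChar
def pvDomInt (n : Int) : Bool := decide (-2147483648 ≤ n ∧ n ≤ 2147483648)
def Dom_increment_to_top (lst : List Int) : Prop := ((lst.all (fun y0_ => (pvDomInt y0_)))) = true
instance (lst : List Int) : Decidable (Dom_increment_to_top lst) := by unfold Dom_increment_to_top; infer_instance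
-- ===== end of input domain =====

-- B replaces A's sort-then-scan with the closed form max(lst)*len(lst) - sum(lst) (no sorting): faster.


-- ===== PORT A =====
-- sl = sorted(lst); output = 0; while index < len(sl)-1: output += sl[-1] - sl[index]; index += 1
def increment_to_top (lst : List Int) : Int :=
  let sl := PySem.List.sorted lst (fun x => x) false
  (PySem.List.pyRange 0 ((sl.length : Int) - 1) 1).foldl
    (fun output index => output + (PySem.List.pyGetD sl (-1) 0 - PySem.List.pyGetD sl index 0)) 0

-- ===== PORT B =====
-- if not lst: return 0; m = max(lst); return m*len(lst) - sum(lst)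
def increment_to_top_alt (lst : List Int) : Int :=
  if lst.isEmpty then 0
  else
    match PySem.List.max? lst (fun x => x) with
    | some m => m * (lst.length : Int) - lst.sum
    | none => 0

-- ===== PRECONDITION & SPEC =====
def Spec_increment_to_top (lst : List Int) (out : Int) : Prop := out = increment_to_top_alt lst
instance (lst : List Int) (out : Int) : Decidable (Spec_increment_to_top lst out) := by unfold Spec_increment_to_top; infer_instance

-- ===== CLAIM (what is proved, stated in full; the proofs are below) =====
def Claim_equal_increment_to_top : Prop := ∀ (lst : List Int), Dom_increment_to_top lst → Spec_increment_to_top lst (increment_to_top lst)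

-- ===== LEMMAS AND PROOFS =====

-- In the sorted (Pairwise ≤) arrangement of lst, the last element is the maximum of lst.
theorem getLast_sorted_eq_max (lst : List Int) (m : Int)
    (hm : PySem.List.max? lst (fun x => x) = some m)
    (hne : PySem.List.sorted lst (fun x => x) false ≠ []) :
    (PySem.List.sorted lst (fun x => x) false).getLast hne = m := by
  have hperm := PySem.List.sorted_perm lst (fun x => x) false
  have hLmem : (PySem.List.sorted lst (fun x => x) false).getLast hne ∈ lst :=
    hperm.mem_iff.mp (List.getLast_mem hne)
  have hLle : (PySem.List.sorted lst (fun x => x) false).getLast hne ≤ m :=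
    PySem.List.max?_isMax hm _ hLmem
  have hmmem : m ∈ PySem.List.sorted lst (fun x => x) false :=
    hperm.mem_iff.mpr (PySem.List.max?_mem hm)
  obtain ⟨p, hp, hpe⟩ := List.mem_iff_getElem.mp hmmem
  have hmono := PySem.List.key_sorted_getElem_mono lst (fun x => x)
    (p := p) (q := (PySem.List.sorted lst (fun x => x) false).length - 1)
    (by omega) (by omega)
  rw [List.getLast_eq_getElem] at hLle ⊢
  rw [hpe] at hmono
  exact le_antisymm hLle hmono

-- A's fold computes max*len(lst) - sum(lst) for nonempty lst.
theorem increment_to_top_closed (lst : List Int) (m : Int)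
    (hm : PySem.List.max? lst (fun x => x) = some m) :
    increment_to_top lst = m * (lst.length : Int) - lst.sum := by
  set sl := PySem.List.sorted lst (fun x => x) false with hsl
  have hperm : sl.Perm lst := PySem.List.sorted_perm lst (fun x => x) false
  have hlen : sl.length = lst.length := hperm.length_eq
  have hsum : sl.sum = lst.sum := hperm.sum_eq
  have hlstne : lst ≠ [] := List.ne_nil_of_mem (PySem.List.max?_mem hm)
  have hn1 : 1 ≤ sl.length := by
    rw [hlen]; exact List.length_pos_iff.mpr hlstne
  have hne : sl ≠ [] := by
    intro h; rw [h] at hn1; simp at hn1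
  have hL : (PySem.List.pyGetD sl (-1) 0) = sl.getLast hne := PySem.List.pyGetD_neg_one sl 0 hne
  have hLm : sl.getLast hne = m := getLast_sorted_eq_max lst m hm hne
  unfold increment_to_top
  rw [← hsl, PySem.List.foldl_add, hL, hLm]
  have hbound : (sl.length : Int) - 1 = PySem.List.len sl.dropLast := by
    rw [PySem.List.len_eq, List.length_dropLast]; omega
  rw [hbound]
  have hcong : (PySem.List.pyRange 0 (PySem.List.len sl.dropLast) 1).map
        (fun index => m - PySem.List.pyGetD sl index 0)
      = (PySem.List.pyRange 0 (PySem.List.len sl.dropLast) 1).map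
        (fun j => m - PySem.List.pyGetD sl.dropLast j 0) := by
    apply List.map_congr_left
    intro j hj
    have hj' := PySem.List.mem_pyRange_one.mp hj
    have hjlen : j.toNat < sl.dropLast.length := by
      rw [List.length_dropLast]
      rw [PySem.List.len_eq, List.length_dropLast] at hj'
      omega
    have h1 : PySem.List.pyGetD sl j 0 = sl[j.toNat] := by
      apply PySem.List.pyGetD_eq_getElem
      · exact hj'.1
      · rw [List.length_dropLast] at hjlen; omega
    have h2 : PySem.List.pyGetD sl.dropLast j 0 = sl.dropLast[j.toNat] := by
      apply PySem.List.pyGetD_eq_getElem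
      · exact hj'.1
      · omega
    rw [h1, h2, List.getElem_dropLast]
  rw [hcong]
  have hsplit : ∀ (xs : List Int), (xs.map (fun j => m - PySem.List.pyGetD sl.dropLast j 0)).sum
      = (m * xs.length : Int) - (xs.map (fun j => PySem.List.pyGetD sl.dropLast j 0)).sum := by
    intro xs
    induction xs with
    | nil => simp
    | cons a t ih => simp [ih]; ring
  rw [hsplit, PySem.List.map_pyGetD_pyRange_zero]
  have hlr : (PySem.List.pyRange 0 (PySem.List.len sl.dropLast) 1).length = sl.dropLast.length := by
    rw [PySem.List.len_eq, PySem.List.length_pyRange_one]; omega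
  rw [hlr, List.length_dropLast]
  have hdrop : sl.dropLast.sum = lst.sum - m := by
    have h := List.dropLast_concat_getLast hne
    have : sl.dropLast.sum + sl.getLast hne = sl.sum := by
      conv_rhs => rw [← h]; rw [List.sum_append]; simp
    rw [hLm, hsum] at this
    omega
  rw [hdrop, Nat.cast_sub hn1, hlen]
  ring

-- ===== VERDICT (by name: the statement is the Claim_ definition above) =====
theorem increment_to_top_spec : Claim_equal_increment_to_top := by
  intro lst _
  unfold Spec_increment_to_top increment_to_top_alt
  cases lst with
  | nil => decide
  | cons x t =>
    simp only [List.isEmpty_cons, if_neg Bool.false_ne_true, PySem.List.max?_id_cons]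
    exact increment_to_top_closed (x :: t) _ (PySem.List.max?_id_cons x t)
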